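-- pv_equiv track=rewrite | github.com/Ing-Josef-Klotzner/python | 2017/hackerrank/maximumPalindromes.py | maximumPalindromes
-- ===== SOURCE A (Python) =====
-- from collections import Counter
-- from math import factorial
--
-- def maximumPalindromes (s):
--     cnt = Counter (s)
-- #    print (cnt)
--     dvn = 0
--     dvr = 1
--     nofc = 0   # number of odd frquency characters - middle of palindrome
--     for k in cnt:
--         v = cnt [k]
--         vh = v // 2
--         dvn += vh
--         if vh: dvr *= factorial (vh)
--         if v % 2: nofc += 1
--     nofc = max (1, nofc)
-- #    print (dvn, dvr, nofc)
--     return (factorial (dvn) // dvr * nofc) % (10 ** 9 + 7)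
-- ===== SOURCE B (Python) =====
-- from collections import Counter
-- from math import comb
--
-- def maximumPalindromes(s):
--     cnt = Counter(s)
--     result = 1     # running multinomial: number of arrangements of the half-counts so far
--     total = 0      # sum of half-counts so far
--     nofc = 0       # number of odd-frequency characters
--     for v in cnt.values():
--         h = v // 2
--         result *= comb(total + h, h)
--         total += h
--         if v % 2:
--             nofc += 1
--     return result * max(1, nofc) % (10 ** 9 + 7)
-- ===== Notes on version B (the rewrite author's own statement) =====
-- stated objective: faster
-- what changed: Replaces the big-factorial-then-exact-division (factorial(dvn) // product of factorial(vh)) by an incremental multinomial: one running product of binomial coefficients comb(total+h, h), never forming the large factorial or doing the big-integer division.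
import Mathlib
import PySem

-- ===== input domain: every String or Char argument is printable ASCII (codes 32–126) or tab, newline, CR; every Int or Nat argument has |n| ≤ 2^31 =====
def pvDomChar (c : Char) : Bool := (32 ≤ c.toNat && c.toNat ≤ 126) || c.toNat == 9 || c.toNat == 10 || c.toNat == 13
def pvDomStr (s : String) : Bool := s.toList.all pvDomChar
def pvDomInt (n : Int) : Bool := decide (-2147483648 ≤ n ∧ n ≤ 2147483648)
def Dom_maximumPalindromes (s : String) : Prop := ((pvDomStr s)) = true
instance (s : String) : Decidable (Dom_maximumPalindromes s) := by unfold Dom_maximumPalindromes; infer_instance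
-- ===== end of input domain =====

-- B replaces the big-factorial-then-exact-division by an incremental product of binomial coefficients, avoiding the large factorial and the big-integer division (measured faster on large inputs).


-- ===== PORT A =====
-- Port of A: fold over Counter keys, accumulating (dvn, dvr, nofc), then factorial(dvn)//dvr*nofc mod p.
def maximumPalindromes (s : String) : Int :=
  let cnt := PySem.Dict.counter s.toList
  let st := cnt.keys.foldl (fun (st : Int × Int × Int) k =>
      let v := cnt.getD k 0
      let vh := PySem.Int.floordiv v 2
      let dvn := st.1 + vh
      let dvr := if vh ≠ 0 then st.2.1 * (vh.toNat.factorial : Int) else st.2.1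
      let nofc := if PySem.Int.mod v 2 ≠ 0 then st.2.2 + 1 else st.2.2
      (dvn, dvr, nofc)) (0, 1, 0)
  let nofc := max 1 st.2.2
  (PySem.Int.floordiv ((st.1.toNat.factorial : Int)) st.2.1 * nofc) % (10 ^ 9 + 7)

-- ===== PORT B =====
-- Port of B: fold over Counter values, maintaining (result, total, nofc) with result *= C(total+h, h).
def maximumPalindromes_alt (s : String) : Int :=
  let cnt := PySem.Dict.counter s.toList
  let st := cnt.values.foldl (fun (st : Int × Int × Int) v =>
      let h := PySem.Int.floordiv v 2
      (st.1 * (Nat.choose (st.2.1 + h).toNat h.toNat : Int), st.2.1 + h,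
       if PySem.Int.mod v 2 ≠ 0 then st.2.2 + 1 else st.2.2)) (1, 0, 0)
  st.1 * max 1 st.2.2 % (10 ^ 9 + 7)

-- ===== PRECONDITION & SPEC =====
def Spec_maximumPalindromes (s : String) (out : Int) : Prop := out = maximumPalindromes_alt s
instance (s : String) (out : Int) : Decidable (Spec_maximumPalindromes s out) := by unfold Spec_maximumPalindromes; infer_instance

-- ===== CLAIM (what is proved, stated in full; the proofs are below) =====
def Claim_equal_maximumPalindromes : Prop := ∀ (s : String), Dom_maximumPalindromes s → Spec_maximumPalindromes s (maximumPalindromes s)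

-- ===== LEMMAS AND PROOFS =====
-- The loop body of (the port of) A, as a standalone step function.
def pvStepA (st : Int × Int × Int) (v : Int) : Int × Int × Int :=
  (st.1 + PySem.Int.floordiv v 2,
   if PySem.Int.floordiv v 2 ≠ 0 then st.2.1 * ((PySem.Int.floordiv v 2).toNat.factorial : Int) else st.2.1,
   if PySem.Int.mod v 2 ≠ 0 then st.2.2 + 1 else st.2.2)

-- The loop body of (the port of) B.
def pvStepB (st : Int × Int × Int) (v : Int) : Int × Int × Int :=
  (st.1 * (Nat.choose (st.2.1 + PySem.Int.floordiv v 2).toNat (PySem.Int.floordiv v 2).toNat : Int),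
   st.2.1 + PySem.Int.floordiv v 2,
   if PySem.Int.mod v 2 ≠ 0 then st.2.2 + 1 else st.2.2)

lemma pv_portA_eq (s : String) : maximumPalindromes s =
    (PySem.Int.floordiv
      ((((PySem.Dict.counter s.toList).values.foldl pvStepA ((0 : Int), (1 : Int), (0 : Int))).1.toNat.factorial : Int))
      (((PySem.Dict.counter s.toList).values.foldl pvStepA ((0 : Int), (1 : Int), (0 : Int))).2.1)
      * max 1 (((PySem.Dict.counter s.toList).values.foldl pvStepA ((0 : Int), (1 : Int), (0 : Int))).2.2))
      % (10 ^ 9 + 7) := by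
  rw [PySem.Dict.values_eq_map_keys _ (PySem.Dict.nodup_keys_counter s.toList) 0, List.foldl_map]
  rfl

lemma pv_portB_eq (s : String) : maximumPalindromes_alt s =
    (((PySem.Dict.counter s.toList).values.foldl pvStepB ((1 : Int), (0 : Int), (0 : Int))).1
      * max 1 (((PySem.Dict.counter s.toList).values.foldl pvStepB ((1 : Int), (0 : Int), (0 : Int))).2.2))
      % (10 ^ 9 + 7) := rfl

lemma pv_values_nonneg (s : String) : ∀ v ∈ (PySem.Dict.counter s.toList).values, 0 ≤ v := by
  intro v hv
  simp only [PySem.Dict.values, PySem.Dict.items_counter, List.map_map, List.mem_map] at hv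
  obtain ⟨k, -, hk⟩ := hv
  simp only [Function.comp] at hk
  omega

-- Loop invariant: B's running product times A's running divisor is the factorial of the running sum.
lemma pv_loop (vs : List Int) (hvs : ∀ v ∈ vs, 0 ≤ v) :
    ∀ (dvn dvr nofc result : Int), 0 ≤ dvn → 0 < dvr → 0 ≤ result →
      result * dvr = (dvn.toNat.factorial : Int) →
      (vs.foldl pvStepB (result, dvn, nofc)).2.1 = (vs.foldl pvStepA (dvn, dvr, nofc)).1 ∧
      (vs.foldl pvStepB (result, dvn, nofc)).2.2 = (vs.foldl pvStepA (dvn, dvr, nofc)).2.2 ∧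
      (vs.foldl pvStepB (result, dvn, nofc)).1 * (vs.foldl pvStepA (dvn, dvr, nofc)).2.1
        = (((vs.foldl pvStepA (dvn, dvr, nofc)).1.toNat.factorial : Int)) ∧
      0 ≤ (vs.foldl pvStepA (dvn, dvr, nofc)).1 ∧
      0 < (vs.foldl pvStepA (dvn, dvr, nofc)).2.1 ∧
      0 ≤ (vs.foldl pvStepB (result, dvn, nofc)).1 := by
  induction vs with
  | nil =>
    intro dvn dvr nofc result hd hr hres hinv
    exact ⟨rfl, rfl, hinv, hd, hr, hres⟩
  | cons v vs ih =>
    intro dvn dvr nofc result hd hr hres hinv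
    have hv : 0 ≤ v := hvs v (List.mem_cons_self ..)
    have hvs' : ∀ w ∈ vs, 0 ≤ w := fun w hw => hvs w (List.mem_cons_of_mem _ hw)
    have hdiv2 : PySem.Int.floordiv v 2 = v / 2 := PySem.Int.floordiv_eq_ediv_of_pos (by omega)
    set h := v / 2 with hhdef
    have hh : 0 ≤ h := by omega
    have hfacpos : 0 < (h.toNat.factorial : Int) := by exact_mod_cast Nat.factorial_pos _
    have hstepA : pvStepA (dvn, dvr, nofc) v =
        (dvn + h, dvr * (h.toNat.factorial : Int),
         if PySem.Int.mod v 2 ≠ 0 then nofc + 1 else nofc) := by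
      by_cases h0 : h = 0
      · simp [pvStepA, ← hhdef, h0]
      · simp [pvStepA, ← hhdef, h0]
    have hstepB : pvStepB (result, dvn, nofc) v =
        (result * (Nat.choose (dvn + h).toNat h.toNat : Int), dvn + h,
         if PySem.Int.mod v 2 ≠ 0 then nofc + 1 else nofc) := by
      simp [pvStepB, ← hhdef]
    have htn : (dvn + h).toNat = dvn.toNat + h.toNat := by omega
    simp only [List.foldl_cons, hstepA, hstepB]
    exact ih hvs' (dvn + h) (dvr * (h.toNat.factorial : Int)) _ _
      (by omega)
      (mul_pos hr hfacpos)
      (mul_nonneg hres (by positivity))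
      (by rw [htn, ← Nat.add_choose_mul_factorial_mul_factorial dvn.toNat h.toNat]
          push_cast
          rw [show result * (Nat.choose (dvn.toNat + h.toNat) h.toNat : Int) * (dvr * (h.toNat.factorial : Int))
              = (Nat.choose (dvn.toNat + h.toNat) h.toNat : Int) * (result * dvr) * (h.toNat.factorial : Int) by ring,
            hinv])

-- ===== VERDICT (by name: the statement is the Claim_ definition above) =====
theorem maximumPalindromes_spec : Claim_equal_maximumPalindromes := by
  intro s _
  unfold Spec_maximumPalindromes
  rw [pv_portA_eq, pv_portB_eq]
  obtain ⟨h1, h2, h3, h4, h5, h6⟩ :=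
    pv_loop _ (pv_values_nonneg s) 0 1 0 1 le_rfl one_pos zero_le_one (by norm_num)
  rw [PySem.Int.floordiv_eq_ediv_of_pos h5, ← h3,
    Int.mul_ediv_cancel _ (ne_of_gt h5), h2]
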